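-- pv_equiv track=rewrite | github.com/Abacadabras/course-algo-python3 | contest_09/f.py | foo_main
-- ===== SOURCE A (Python) =====
-- def foo_main(number: str) -> int:
--
--     number = [i for i in number]
--     number.sort()
--     for i in range(len(number)):
--         if number[i] != '0':
--             number[0], number[i] = number[i], number[0]
--             break
--     return number
-- ===== SOURCE B (Python) =====
-- def foo_main(number: str) -> int:
--     # counting sort over the 128 ASCII buckets (C-speed str.count / str-repeat / join),
--     # then the smallest non-'0' character is placed up front directly
--     z = number.count('0')
--     pre = ''.join(chr(c) * number.count(chr(c)) for c in range(48))
--     tail = ''.join(chr(c) * number.count(chr(c)) for c in range(49, 128))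
--     if pre or not tail:
--         return list(pre + '0' * z + tail)
--     return list(tail[0] + '0' * z + tail[1:])
-- ===== Notes on version B (the rewrite author's own statement) =====
-- stated objective: alternative
-- what changed: A materialises the characters as a list, comparison-sorts it and scans for the first non-'0' element to swap to the front; B never sorts: it counting-sorts into the 128 ASCII buckets via per-code str.count and assembles the answer directly as below-'0' chars ++ smallest non-'0' char (when nothing smaller exists) ++ zeros ++ the rest, using C-level string bulk operations instead of per-element Python work.
import Mathlib
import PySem

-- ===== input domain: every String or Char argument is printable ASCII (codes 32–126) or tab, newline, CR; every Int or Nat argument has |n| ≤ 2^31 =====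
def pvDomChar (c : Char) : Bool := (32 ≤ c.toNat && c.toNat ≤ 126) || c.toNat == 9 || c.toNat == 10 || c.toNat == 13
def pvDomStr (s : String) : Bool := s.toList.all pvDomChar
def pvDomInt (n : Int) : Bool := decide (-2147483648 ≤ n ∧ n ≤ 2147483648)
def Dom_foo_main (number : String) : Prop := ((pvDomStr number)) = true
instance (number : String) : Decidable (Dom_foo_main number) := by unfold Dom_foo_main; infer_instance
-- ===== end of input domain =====

-- B replaces A's comparison sort + swap scan by a counting sort over the 128 ASCII
-- buckets, placing the smallest non-'0' character up front directly (objective: alternative).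

-- ===== PORT A =====
-- the for-loop with break: scan indices, swap at the first index holding a non-"0" element
def fooSwapLoop (l : List String) : List Nat → List String
  | [] => l
  | i :: rest =>
    if l.getD i "" ≠ "0" then (l.set 0 (l.getD i "")).set i (l.getD 0 "")
    else fooSwapLoop l rest

def foo_main (number : String) : List String :=
  let l := PySem.List.sorted (number.toList.map (fun c => String.ofList [c])) (fun x => x) false
  fooSwapLoop l (List.range l.length)

-- ===== PORT B =====
-- chr(c) * number.count(chr(c)) : string repetition ported exactly via list repetition
def fooRepChar (number : String) (c : Nat) : String :=
  String.ofList (PySem.List.pyRepeat [Char.ofNat c] (PySem.Str.count number (String.ofList [Char.ofNat c])))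

def foo_main_alt (number : String) : List String :=
  let z := PySem.Str.count number "0"
  let pre := PySem.Str.join "" ((List.range 48).map (fooRepChar number))
  let tl := PySem.Str.join "" ((List.range' 49 79).map (fooRepChar number))
  if pre ≠ "" ∨ tl = "" then
    (pre ++ String.ofList (PySem.List.pyRepeat ['0'] z) ++ tl).toList.map (fun ch => String.ofList [ch])
  else
    -- tl[0] is guarded by the branch: tl ≠ "" there, so the getD default is never read
    (String.ofList [(PySem.Str.pyGet? tl 0).getD ' '] ++ String.ofList (PySem.List.pyRepeat ['0'] z)
      ++ PySem.Str.slice tl (some 1) none).toList.map (fun ch => String.ofList [ch])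

-- ===== PRECONDITION & SPEC =====
def Spec_foo_main (number : String) (out : List String) : Prop := out = foo_main_alt number
instance (number : String) (out : List String) : Decidable (Spec_foo_main number out) := by unfold Spec_foo_main; infer_instance

-- ===== CLAIM (what is proved, stated in full; the proofs are below) =====
def Claim_equal_foo_main : Prop := ∀ (number : String), Dom_foo_main number → Spec_foo_main number (foo_main number)

-- ===== LEMMAS AND PROOFS =====

-- a one-character Python string
def mk1 (c : Char) : String := String.ofList [c]

-- the bucket of counting sort for character code k
def bucket (cs : List Char) (k : Nat) : List String :=
  List.replicate (cs.count (Char.ofNat k)) (mk1 (Char.ofNat k))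

-- B's prefix (codes below '0') and tail (codes above '0') as flatMaps over buckets
def preL (cs : List Char) : List String := (List.range 48).flatMap (bucket cs)
def tlL (cs : List Char) : List String := (List.range' 49 79).flatMap (bucket cs)

theorem mk1_inj {a b : Char} (h : mk1 a = mk1 b) : a = b := by
  have := congrArg String.toList h; simpa [mk1] using this

theorem mk1_le {a b : Char} (h : a ≤ b) : mk1 a ≤ mk1 b := by
  rw [mk1, mk1, String.le_iff_toList_le]
  simp only [String.toList_ofList]
  rcases lt_or_eq_of_le h with h | h
  · exact le_of_lt ((List.lt_iff_lex_lt ..).mpr (List.Lex.rel h))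
  · simp [h]

theorem toNat_ofNat_small {k : Nat} (h : k < 128) : (Char.ofNat k).toNat = k := by
  rw [Char.toNat_ofNat]
  have : k.isValidChar := Or.inl (by omega)
  simp [this]

theorem char48 : Char.ofNat 48 = '0' := by decide

theorem mem_bucket_ne_zero {cs : List Char} {k : Nat} {x : String} (hk : k < 128) (hk48 : k ≠ 48)
    (hx : x ∈ bucket cs k) : x ≠ "0" := by
  have hxe : x = mk1 (Char.ofNat k) := List.eq_of_mem_replicate hx
  subst hxe
  intro h
  have h0 : mk1 (Char.ofNat 48) = "0" := by decide
  have hc : Char.ofNat k = Char.ofNat 48 := mk1_inj (h.trans h0.symm)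
  have := congrArg Char.toNat hc
  rw [toNat_ofNat_small hk, toNat_ofNat_small (by omega)] at this
  omega

theorem perm_flatMap_buckets (cs : List Char) (h : ∀ c ∈ cs, c.toNat < 128) :
    ((List.range 128).flatMap (bucket cs)).Perm (cs.map mk1) := by
  rw [List.perm_iff_count]
  intro x
  rw [List.count_flatMap]
  by_cases hx : x ∈ cs.map mk1
  · obtain ⟨a, ha, rfl⟩ := List.mem_map.1 hx
    have ha128 : a.toNat < 128 := h a ha
    have hmap : (List.range 128).map (List.count (mk1 a) ∘ bucket cs)
        = (List.range 128).map (fun k => if k = a.toNat then cs.count a else 0) := by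
      apply List.map_congr_left
      intro k hk
      have hk128 : k < 128 := List.mem_range.1 hk
      simp only [Function.comp, bucket, List.count_replicate]
      by_cases he : mk1 (Char.ofNat k) = mk1 a
      · have hca : Char.ofNat k = a := mk1_inj he
        have hkk : k = a.toNat := by rw [← hca, toNat_ofNat_small hk128]
        simp [hkk]
      · have hkk : k ≠ a.toNat := by
          intro hkeq
          exact he (by rw [hkeq, Char.ofNat_toNat a])
        simp [he, hkk]
    rw [hmap, List.count_map_of_injective _ _ (fun _ _ hh => mk1_inj hh)]
    have hsum : ((List.range 128).map (fun k => if k = a.toNat then cs.count a else 0)).sum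
        = ∑ k ∈ Finset.range 128, (if k = a.toNat then cs.count a else 0) := rfl
    rw [hsum, Finset.sum_ite_eq' (Finset.range 128) a.toNat (fun _ => cs.count a)]
    simp [Finset.mem_range.2 ha128]
  · rw [List.count_eq_zero.2 hx]
    apply List.sum_eq_zero
    intro n hn
    obtain ⟨k, hk, rfl⟩ := List.mem_map.1 hn
    simp only [Function.comp, bucket, List.count_replicate]
    by_cases he : mk1 (Char.ofNat k) = x
    · have hc0 : cs.count (Char.ofNat k) = 0 := by
        by_contra hc
        have hmem : Char.ofNat k ∈ cs := List.count_pos_iff.1 (Nat.pos_of_ne_zero hc)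
        exact hx (he ▸ List.mem_map_of_mem hmem)
      simp [he, hc0]
    · simp [he]

theorem pairwise_flatMap_buckets (cs : List Char) :
    ((List.range 128).flatMap (bucket cs)).Pairwise (fun a b => a ≤ b) := by
  rw [List.pairwise_flatMap]
  constructor
  · intro k _
    exact List.pairwise_replicate.2 (Or.inr le_rfl)
  · rw [List.pairwise_iff_getElem]
    intro i j hi hj hij x hx y hy
    simp only [List.length_range] at hi hj
    rw [List.getElem_range] at hx hy
    have hxe : x = mk1 (Char.ofNat i) := List.eq_of_mem_replicate hx
    have hye : y = mk1 (Char.ofNat j) := List.eq_of_mem_replicate hy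
    subst hxe hye
    apply mk1_le
    rw [Char.le_def, UInt32.le_iff_toNat_le]
    show (Char.ofNat i).toNat ≤ (Char.ofNat j).toNat
    rw [toNat_ofNat_small hi, toNat_ofNat_small hj]
    omega

-- counting sort names the sorted list
theorem sorted_eq_flatMap (cs : List Char) (h : ∀ c ∈ cs, c.toNat < 128) :
    PySem.List.sorted (cs.map mk1) (fun x => x) false = (List.range 128).flatMap (bucket cs) :=
  PySem.List.sorted_id_eq_of_perm_of_pairwise _ _ (perm_flatMap_buckets cs h) (pairwise_flatMap_buckets cs)

-- the grouped list splits as prefix ++ zeros ++ tail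
theorem flatMap_split (cs : List Char) :
    (List.range 128).flatMap (bucket cs) = preL cs ++ List.replicate (cs.count '0') "0" ++ tlL cs := by
  have h1 : List.range 128 = List.range' 0 48 ++ List.range' 48 80 := by
    rw [List.range_eq_range']
    have := List.range'_append (s := 0) (m := 48) (n := 80) (step := 1)
    simpa using this.symm
  have h2 : List.range' 48 80 = 48 :: List.range' 49 79 := by
    rw [List.range'_succ]
  have hb : bucket cs 48 = List.replicate (cs.count '0') "0" := by
    rw [bucket, char48]
    congr 1
  rw [h1, h2, List.flatMap_append, List.flatMap_cons, hb, preL, tlL, List.range_eq_range']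
  simp [List.append_assoc]

theorem fooSwapLoop_eq_find (l : List String) (idxs : List Nat) :
    fooSwapLoop l idxs =
      match idxs.find? (fun i => decide (l.getD i "" ≠ "0")) with
      | some i => (l.set 0 (l.getD i "")).set i (l.getD 0 "")
      | none => l := by
  induction idxs with
  | nil => rfl
  | cons i rest ih =>
    by_cases h : l.getD i "" = "0"
    all_goals simp only [fooSwapLoop, List.find?, List.getD] at h ih ⊢
    all_goals simp [h, ih]

theorem find?_range_first {p : Nat → Bool} {z n : Nat} (hz : z < n)
    (h0 : ∀ j < z, p j = false) (h1 : p z = true) :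
    (List.range n).find? p = some z := by
  induction z generalizing p n with
  | zero =>
    obtain ⟨m, rfl⟩ : ∃ m, n = m + 1 := ⟨n - 1, by omega⟩
    rw [List.range_succ_eq_map]
    simp [List.find?, h1]
  | succ z ih =>
    obtain ⟨m, rfl⟩ : ∃ m, n = m + 1 := ⟨n - 1, by omega⟩
    rw [List.range_succ_eq_map]
    have hp0 : p 0 = false := h0 0 (by omega)
    simp only [List.find?, hp0, List.find?_map]
    have := ih (p := p ∘ Nat.succ) (n := m) (by omega)
      (fun j hj => h0 (j+1) (by omega)) h1
    simp only [this]
    rfl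

-- elements of B's prefix and tail are never "0"
theorem mem_preL_ne_zero {cs : List Char} {x : String} (hx : x ∈ preL cs) : x ≠ "0" := by
  obtain ⟨k, hk, hxk⟩ := List.mem_flatMap.1 hx
  have hk48 : k < 48 := List.mem_range.1 hk
  exact mem_bucket_ne_zero (by omega) (by omega) hxk

theorem mem_tlL_ne_zero {cs : List Char} {x : String} (hx : x ∈ tlL cs) : x ≠ "0" := by
  obtain ⟨k, hk, hxk⟩ := List.mem_flatMap.1 hx
  obtain ⟨i, hi, rfl⟩ := List.mem_range'.1 hk
  exact mem_bucket_ne_zero (by omega) (by omega) hxk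

-- the character-level bucket of counting sort
def charBucket (cs : List Char) (k : Nat) : List Char :=
  List.replicate (cs.count (Char.ofNat k)) (Char.ofNat k)

theorem bucket_eq_map (cs : List Char) (k : Nat) :
    bucket cs k = (charBucket cs k).map mk1 := by
  rw [bucket, charBucket, List.map_replicate]

theorem mk1_zero : mk1 '0' = "0" := by decide

theorem joinNil (xss : List (List Char)) : PySem.Chars.join [] xss = xss.flatten := by
  rw [PySem.Chars.join, List.intercalate]
  induction xss with
  | nil => simp
  | cons x xs ih =>
    cases xs with
    | nil => simp [List.intersperse]
    | cons y ys =>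
      simp only [List.intersperse] at ih ⊢
      simp [ih]

theorem count_go_singleton (c : Char) (fuel : Nat) (l : List Char) (acc : Nat)
    (h : l.length ≤ fuel) : PySem.Chars.count.go [c] fuel l acc = acc + l.count c := by
  induction fuel generalizing l acc with
  | zero =>
    have : l = [] := List.eq_nil_of_length_eq_zero (by omega)
    subst this; simp [PySem.Chars.count.go]
  | succ f ih =>
    cases l with
    | nil => simp [PySem.Chars.count.go]
    | cons h' t =>
      have hlen : t.length ≤ f := by simpa using h
      simp only [PySem.Chars.count.go]
      by_cases he : c = h'
      · subst he
        rw [if_pos (by simp [List.isPrefixOf])]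
        simp only [List.length_cons, List.length_nil, List.drop_succ_cons, List.drop_zero]
        rw [ih t (acc + 1) hlen]
        simp only [List.count_cons, BEq.rfl, if_pos]
        omega
      · rw [if_neg (by simp [List.isPrefixOf, he])]
        rw [ih t acc hlen]
        simp only [List.count_cons, beq_iff_eq]
        have hne : ¬ h' = c := fun hh => he hh.symm
        simp [hne]

-- Python s.count(ch) for a single character is List.count on the code points
theorem chars_count_singleton (l : List Char) (c : Char) :
    PySem.Chars.count l [c] = l.count c := by
  rw [PySem.Chars.count]
  simp only [List.isEmpty_cons, Bool.false_eq_true, if_false]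
  exact (count_go_singleton c l.length l 0 le_rfl).trans (by omega)

-- B's port, rewritten through preL/tlL
theorem foo_main_alt_eq (number : String) :
    foo_main_alt number =
      (if preL number.toList ≠ [] ∨ tlL number.toList = [] then
        preL number.toList ++ List.replicate (number.toList.count '0') "0" ++ tlL number.toList
      else (tlL number.toList).headD "" :: (List.replicate (number.toList.count '0') "0" ++ (tlL number.toList).tail)) := by
  have hcnt : ∀ c : Char, PySem.Str.count number (String.ofList [c]) = number.toList.count c := by
    intro c
    rw [PySem.Str.count_eq, String.toList_ofList, chars_count_singleton]
  have hz : PySem.Str.count number "0" = number.toList.count '0' := by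
    have h0 : ("0" : String) = String.ofList ['0'] := by decide
    rw [h0, hcnt]
  have hrep : ∀ k : Nat, (fooRepChar number k).toList = charBucket number.toList k := by
    intro k
    rw [fooRepChar, String.toList_ofList, PySem.List.pyRepeat_singleton, hcnt, Int.toNat_natCast,
      charBucket]
  have hjoin : ∀ (r : List Nat), (PySem.Str.join "" (r.map (fooRepChar number))).toList
      = r.flatMap (charBucket number.toList) := by
    intro r
    rw [PySem.Str.toList_join]
    show PySem.Chars.join [] _ = _
    rw [joinNil, List.map_map]
    have hmc : List.map (String.toList ∘ fooRepChar number) r = List.map (charBucket number.toList) r :=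
      List.map_congr_left (fun k _ => hrep k)
    rw [hmc, List.flatMap_def]
  have hmid : (String.ofList (PySem.List.pyRepeat ['0'] (PySem.Str.count number "0"))).toList
      = List.replicate (number.toList.count '0') '0' := by
    rw [String.toList_ofList, PySem.List.pyRepeat_singleton, hz, Int.toNat_natCast]
  have hpreL : preL number.toList = ((List.range 48).flatMap (charBucket number.toList)).map mk1 := by
    rw [preL, List.map_flatMap]
    exact List.flatMap_congr (fun k _ => bucket_eq_map number.toList k)
  have htlL : tlL number.toList = ((List.range' 49 79).flatMap (charBucket number.toList)).map mk1 := by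
    rw [tlL, List.map_flatMap]
    exact List.flatMap_congr (fun k _ => bucket_eq_map number.toList k)
  have hcond : (PySem.Str.join "" ((List.range 48).map (fooRepChar number)) ≠ ""
        ∨ PySem.Str.join "" ((List.range' 49 79).map (fooRepChar number)) = "")
      ↔ (preL number.toList ≠ [] ∨ tlL number.toList = []) := by
    have h1 : (PySem.Str.join "" ((List.range 48).map (fooRepChar number)) = "") ↔ preL number.toList = [] := by
      rw [← String.toList_eq_nil_iff, hjoin, hpreL, List.map_eq_nil_iff]
    have h2 : (PySem.Str.join "" ((List.range' 49 79).map (fooRepChar number)) = "") ↔ tlL number.toList = [] := by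
      rw [← String.toList_eq_nil_iff, hjoin, htlL, List.map_eq_nil_iff]
    exact or_congr (not_congr h1) h2
  simp only [foo_main_alt]
  by_cases hc : preL number.toList ≠ [] ∨ tlL number.toList = []
  · rw [if_pos (hcond.mpr hc), if_pos hc]
    simp only [List.map_append, String.toList_append, hjoin, hmid, hpreL, htlL,
      List.map_replicate, show (fun ch => String.ofList [ch]) = mk1 from rfl, mk1_zero]
  · rw [if_neg (fun hh => hc (hcond.mp hh)), if_neg hc]
    push Not at hc
    obtain ⟨hp, ht⟩ := hc
    have htl' : (PySem.Str.join "" ((List.range' 49 79).map (fooRepChar number))).toList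
        = (List.range' 49 79).flatMap (charBucket number.toList) := hjoin _
    rcases hctl : (List.range' 49 79).flatMap (charBucket number.toList) with _ | ⟨d, ds⟩
    · exact absurd (by rw [htlL, hctl]; rfl) ht
    · have htoList : (PySem.Str.join "" ((List.range' 49 79).map (fooRepChar number))).toList
          = d :: ds := by rw [htl', hctl]
      have hget : PySem.Str.pyGet? (PySem.Str.join "" ((List.range' 49 79).map (fooRepChar number))) 0
          = some d := by
        rw [PySem.Str.pyGet?_eq, PySem.Chars.pyGet?_eq_listPyGet?, htoList]
        simp [PySem.List.pyGet?, PySem.List.pyIdx?]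
      have hslice : (PySem.Str.slice (PySem.Str.join "" ((List.range' 49 79).map (fooRepChar number)))
          (some 1) none).toList = ds := by
        rw [PySem.Str.toList_slice, PySem.Chars.slice_eq_listSlice, htoList,
          PySem.List.slice_from _ (by omega)]
        rfl
      simp only [List.map_append, String.toList_append, hget, Option.getD_some, hslice, hmid,
        String.toList_ofList, List.map_replicate, htlL, hctl, List.map_cons,
        List.headD_cons, List.tail_cons, List.singleton_append,
        show (fun ch => String.ofList [ch]) = mk1 from rfl, mk1_zero]
      rw [List.cons_append]

-- A's swap loop on the grouped sorted list
theorem loop_on_grouped (P T : List String) (z : Nat)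
    (hP : ∀ x ∈ P, x ≠ "0") (hT : ∀ x ∈ T, x ≠ "0") :
    fooSwapLoop (P ++ List.replicate z "0" ++ T) (List.range (P ++ List.replicate z "0" ++ T).length)
      = (if P ≠ [] ∨ T = [] then P ++ List.replicate z "0" ++ T
         else T.headD "" :: (List.replicate z "0" ++ T.tail)) := by
  rw [fooSwapLoop_eq_find]
  rcases P with _ | ⟨p, P'⟩
  · rcases T with _ | ⟨t, T'⟩
    · -- only zeros: the loop never fires
      have hnone : (List.range ([] ++ List.replicate z "0" ++ ([] : List String)).length).find?
          (fun i => decide (([] ++ List.replicate z "0" ++ ([] : List String)).getD i "" ≠ "0")) = none := by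
        rw [List.find?_eq_none]
        intro i hi
        simp only [List.nil_append, List.append_nil, List.length_replicate, List.mem_range] at hi ⊢
        rw [List.getD_replicate _ hi]
        simp
      rw [hnone]
      simp
    · -- zeros then a non-zero element: swap indices 0 and z
      have ht0 : t ≠ "0" := hT t (List.mem_cons_self ..)
      have hL : ([] ++ List.replicate z "0" ++ (t :: T')) = List.replicate z "0" ++ (t :: T') := by simp
      rw [hL]
      have hfind : (List.range (List.replicate z "0" ++ (t :: T')).length).find?
          (fun i => decide ((List.replicate z "0" ++ (t :: T')).getD i "" ≠ "0")) = some z := by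
        apply find?_range_first
        · simp
        · intro j hj
          rw [List.getD_append _ _ _ _ (by simpa using hj), List.getD_replicate _ hj]
          simp
        · rw [List.getD_append_right _ _ _ _ (by simp)]
          simp [ht0]
      rw [hfind]
      simp only []
      have hgz : (List.replicate z "0" ++ (t :: T')).getD z "" = t := by
        rw [List.getD_append_right _ _ _ _ (by simp)]
        simp
      rw [hgz]
      rcases z with _ | s
      · simp
      · have hg0 : (List.replicate (s+1) "0" ++ (t :: T')).getD 0 "" = "0" := by
          rw [List.getD_append _ _ _ _ (by simp), List.getD_replicate _ (by omega)]
        rw [hg0]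
        have hcons : List.replicate (s+1) "0" ++ (t :: T') = "0" :: (List.replicate s "0" ++ (t :: T')) := by
          simp [List.replicate_succ]
        rw [hcons]
        simp only [List.set]
        rw [List.set_append_right _ _ (by simp)]
        simp [List.replicate_succ', List.append_assoc]
  · -- a sub-'0' character leads: the swap at index 0 is the identity
    have hp0 : p ≠ "0" := hP p (List.mem_cons_self ..)
    have hfind : (List.range ((p :: P') ++ List.replicate z "0" ++ T).length).find?
        (fun i => decide (((p :: P') ++ List.replicate z "0" ++ T).getD i "" ≠ "0")) = some 0 := by
      apply find?_range_first
      · simp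
      · intro j hj; omega
      · simp [List.getD, hp0]
    rw [hfind]
    simp [List.getD]

-- ===== VERDICT (by name: the statement is the Claim_ definition above) =====
theorem foo_main_spec : Claim_equal_foo_main := by
  intro number hdom
  have h128 : ∀ c ∈ number.toList, c.toNat < 128 := by
    intro c hc
    have h : pvDomChar c = true := List.all_eq_true.1 hdom c hc
    simp only [pvDomChar, Bool.or_eq_true, Bool.and_eq_true, decide_eq_true_eq, beq_iff_eq] at h
    omega
  show foo_main number = foo_main_alt number
  rw [foo_main_alt_eq]
  show fooSwapLoop (PySem.List.sorted (number.toList.map (fun c => String.ofList [c])) (fun x => x) false)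
      (List.range (PySem.List.sorted (number.toList.map (fun c => String.ofList [c])) (fun x => x) false).length) = _
  have hmk : (fun c : Char => String.ofList [c]) = mk1 := rfl
  rw [hmk, sorted_eq_flatMap number.toList h128, flatMap_split]
  exact loop_on_grouped _ _ _ (fun x hx => mem_preL_ne_zero hx) (fun x hx => mem_tlL_ne_zero hx)
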